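-- pv_equiv track=rewrite | github.com/guangyong89/azalea_interview_project | currency_app/common_func.py | check_if_need_to_be_replaced
-- ===== SOURCE A (Python) =====
-- def check_if_need_to_be_replaced(order_entry_str):
--     """
--     if any of the below is indicated, convert to pk,
--     so it will return
--     orderid-1, orderid-2
--     instead of
--     orderid-1, orderid-11
--     """
--
--     order_str_to_convert_to_pk_list = [
--         'booking_id'
--     ]
--
--     # for every entry whitelisted above,
--     # add in a matching entry with a '-' infront
--     order_str_to_convert_to_pk_list = [
--         '-{}'.format(
--             x
--         ) for x in order_str_to_convert_to_pk_list
--     ] + order_str_to_convert_to_pk_list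
--
--     if order_entry_str in order_str_to_convert_to_pk_list:
--
--         # check if there is a dash infront and return accordingly
--         if ('-' in order_entry_str):
--
--             return '-pk'
--
--         else:
--
--             return 'pk'
--
--     # by default, return original str
--     return order_entry_str
-- ===== SOURCE B (Python) =====
-- def check_if_need_to_be_replaced(order_entry_str):
--     mapping = {'booking_id': 'pk', '-booking_id': '-pk'}
--     return mapping.get(order_entry_str, order_entry_str)
-- ===== Notes on version B (the rewrite author's own statement) =====
-- stated objective: idiomatic
-- what changed: Replaces A's list construction, membership test and nested dash-inspection branch with a single dict lookup whose default returns the input unchanged.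
import Mathlib
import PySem

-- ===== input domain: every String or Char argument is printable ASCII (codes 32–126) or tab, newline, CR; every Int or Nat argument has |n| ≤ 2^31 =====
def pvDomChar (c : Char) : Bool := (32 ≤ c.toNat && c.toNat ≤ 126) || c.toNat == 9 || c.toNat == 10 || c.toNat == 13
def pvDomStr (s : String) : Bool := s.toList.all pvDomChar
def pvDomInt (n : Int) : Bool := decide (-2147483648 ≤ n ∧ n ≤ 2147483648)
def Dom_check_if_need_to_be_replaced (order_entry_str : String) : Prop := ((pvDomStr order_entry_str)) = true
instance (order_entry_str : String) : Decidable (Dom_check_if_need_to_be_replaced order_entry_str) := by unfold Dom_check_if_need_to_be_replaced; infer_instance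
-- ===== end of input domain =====

-- B replaces A's list/branch logic with one dict lookup (idiomatic); same return value everywhere.


-- ===== PORT A =====
-- Port of A: build the whitelist (dash-prefixed copies prepended), membership test, dash branch.
def check_if_need_to_be_replaced (order_entry_str : String) : String :=
  let order_str_to_convert_to_pk_list : List String := ["booking_id"]
  let order_str_to_convert_to_pk_list :=
    (order_str_to_convert_to_pk_list.map (fun x => "-" ++ x)) ++ order_str_to_convert_to_pk_list
  if order_entry_str ∈ order_str_to_convert_to_pk_list then
    if PySem.Str.isIn "-" order_entry_str then "-pk" else "pk"
  else order_entry_str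

-- ===== PORT B =====
-- Port of B: a single dict lookup with the input as default.
def check_if_need_to_be_replaced_alt (order_entry_str : String) : String :=
  let mapping : PySem.Dict String String :=
    (PySem.Dict.empty.insert "booking_id" "pk").insert "-booking_id" "-pk"
  mapping.getD order_entry_str order_entry_str

-- ===== PRECONDITION & SPEC =====
def Spec_check_if_need_to_be_replaced (order_entry_str : String) (out : String) : Prop := out = check_if_need_to_be_replaced_alt order_entry_str
instance (order_entry_str : String) (out : String) : Decidable (Spec_check_if_need_to_be_replaced order_entry_str out) := by unfold Spec_check_if_need_to_be_replaced; infer_instance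

-- ===== CLAIM (what is proved, stated in full; the proofs are below) =====
def Claim_equal_check_if_need_to_be_replaced : Prop := ∀ (order_entry_str : String), Dom_check_if_need_to_be_replaced order_entry_str → Spec_check_if_need_to_be_replaced order_entry_str (check_if_need_to_be_replaced order_entry_str)

-- ===== LEMMAS AND PROOFS =====

-- ===== VERDICT (by name: the statement is the Claim_ definition above) =====
theorem check_if_need_to_be_replaced_spec : Claim_equal_check_if_need_to_be_replaced := by
  intro s _
  unfold Spec_check_if_need_to_be_replaced check_if_need_to_be_replaced check_if_need_to_be_replaced_alt
  by_cases h1 : s = "booking_id"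
  · subst h1; decide
  · by_cases h2 : s = "-booking_id"
    · subst h2; decide
    · have e1 : ("booking_id" == s) = false := beq_false_of_ne (Ne.symm h1)
      have e2 : ("-booking_id" == s) = false := beq_false_of_ne (Ne.symm h2)
      simp [PySem.Dict.getD, PySem.Dict.get?, PySem.Dict.empty, PySem.Dict.insert,
        List.find?, e1, e2, h1, h2]
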